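-- pv_equiv track=rewrite | github.com/goyalgaurav64/Arrays | distinct-elements-in-window-of-size-k-brute-force.py | distinctEle
-- ===== SOURCE A (Python) =====
-- def distinctEle(a,n,k):
--     cnt=0
--     for i in range(k):
--         j=0
--         while j<i:
--             if a[i]==a[j]:
--                 break
--             else:
--                 j+=1
--         if i==j:
--             cnt+=1
--     return cnt
-- ===== SOURCE B (Python) =====
-- def distinctEle(a, n, k):
--     if k <= 0:
--         return 0
--     b = sorted(a[:k])
--     if not b:
--         return 0
--     cnt = 1
--     for i in range(1, len(b)):
--         if b[i] != b[i-1]: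
--             cnt += 1
--     return cnt
-- ===== Notes on version B (the rewrite author's own statement) =====
-- stated objective: faster
-- what changed: Replaces the quadratic for-each-index backward membership scan with sorting the first-k window once and counting adjacent differences in a single pass.
-- intended difference: On a == [] with k == 1 A returns 1 (it counts index 0 without ever reading a[0]); B returns 0, the number of distinct elements in an empty window, which is the intended value. — e.g. on distinctEle([], 0, 1): A returns 1, B returns 0
import Mathlib
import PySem

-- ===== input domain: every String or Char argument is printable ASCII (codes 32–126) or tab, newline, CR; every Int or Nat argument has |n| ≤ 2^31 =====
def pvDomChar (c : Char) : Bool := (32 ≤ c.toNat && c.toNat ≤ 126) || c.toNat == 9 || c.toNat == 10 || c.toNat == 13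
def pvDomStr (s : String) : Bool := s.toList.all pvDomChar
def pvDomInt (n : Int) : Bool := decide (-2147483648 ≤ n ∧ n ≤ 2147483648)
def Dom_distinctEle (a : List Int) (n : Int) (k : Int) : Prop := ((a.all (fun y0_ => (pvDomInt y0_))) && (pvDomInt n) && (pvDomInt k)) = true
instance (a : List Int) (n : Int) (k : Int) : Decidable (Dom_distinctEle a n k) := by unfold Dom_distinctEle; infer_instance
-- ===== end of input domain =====

-- B sorts the first-k window once and counts adjacent differences in one pass, replacing A's quadratic backward membership scan.


-- ===== PORT A =====
-- inner 'while j < i: if a[i]==a[j]: break else j+=1' (returns the final j)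
def pvInnerAGo (a : List Int) (i : Int) : Nat → Int → Int
  | 0, j => j
  | fuel + 1, j =>
    if j < i then
      if PySem.List.pyGetD a i 0 = PySem.List.pyGetD a j 0 then j
      else pvInnerAGo a i fuel (j + 1)
    else j

def pvInnerA (a : List Int) (i : Int) (j : Int) : Int :=
  pvInnerAGo a i (i - j).toNat j

def distinctEle (a : List Int) (n : Int) (k : Int) : Int :=
  (PySem.List.pyRange 0 k 1).foldl
    (fun cnt i => if i = pvInnerA a i 0 then cnt + 1 else cnt) 0

-- ===== PORT B =====
def distinctEle_alt (a : List Int) (n : Int) (k : Int) : Int :=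
  if k ≤ 0 then 0
  else
    let b := PySem.List.sorted (PySem.List.slice a none (some k)) (fun x => x) false
    if b = [] then 0
    else
      (PySem.List.pyRange 1 (b.length : Int) 1).foldl
        (fun cnt i => if PySem.List.pyGetD b i 0 ≠ PySem.List.pyGetD b (i - 1) 0 then cnt + 1 else cnt) 1

-- ===== PRECONDITION & SPEC =====
-- Pre_ excludes exactly the inputs with k ≥ 2 and k > len(a), on which A raises IndexError at a[i].
def Pre_distinctEle (a : List Int) (n : Int) (k : Int) : Prop :=
  k ≤ (a.length : Int) ∨ k ≤ 1
instance (a : List Int) (n : Int) (k : Int) : Decidable (Pre_distinctEle a n k) := by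
  unfold Pre_distinctEle; infer_instance

def pvWitness_distinctEle : List Int × Int × Int := ([1, 2, 1], 0, 3)

-- On a = [] with k = 1, A returns 1 (it counts index 0 without ever reading a[0]); B returns 0,
-- the number of distinct elements in an empty window, which is the intended value.
def D_distinctEle (a : List Int) (n : Int) (k : Int) : Prop := a = [] ∧ k = 1
instance (a : List Int) (n : Int) (k : Int) : Decidable (D_distinctEle a n k) := by
  unfold D_distinctEle; infer_instance

def Spec_distinctEle (a : List Int) (n : Int) (k : Int) (out : Int) : Prop :=
  ¬ D_distinctEle a n k → out = distinctEle_alt a n k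
instance (a : List Int) (n : Int) (k : Int) (out : Int) : Decidable (Spec_distinctEle a n k out) := by
  unfold Spec_distinctEle; infer_instance

def pvDiffWitness_distinctEle : List Int × Int × Int := ([], 0, 1)
def pvDiffWitnessOut_distinctEle : Int × Int := (1, 0)

-- ===== CLAIM (what is proved, stated in full; the proofs are below) =====
def Claim_unchanged_distinctEle : Prop := ∀ (a : List Int) (n : Int) (k : Int), Dom_distinctEle a n k → Pre_distinctEle a n k → Spec_distinctEle a n k (distinctEle a n k)
def Claim_changed_distinctEle : Prop := Dom_distinctEle (pvDiffWitness_distinctEle.1) (pvDiffWitness_distinctEle.2.1) (pvDiffWitness_distinctEle.2.2) ∧ Pre_distinctEle (pvDiffWitness_distinctEle.1) (pvDiffWitness_distinctEle.2.1) (pvDiffWitness_distinctEle.2.2) ∧ D_distinctEle (pvDiffWitness_distinctEle.1) (pvDiffWitness_distinctEle.2.1) (pvDiffWitness_distinctEle.2.2) ∧ distinctEle (pvDiffWitness_distinctEle.1) (pvDiffWitness_distinctEle.2.1) (pvDiffWitness_distinctEle.2.2) = pvDiffWitnessOut_distinctEle.1 ∧ distinctEle_alt (pvDiffWitness_distinctEle.1)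 (pvDiffWitness_distinctEle.2.1) (pvDiffWitness_distinctEle.2.2) = pvDiffWitnessOut_distinctEle.2 ∧ pvDiffWitnessOut_distinctEle.1 ≠ pvDiffWitnessOut_distinctEle.2
def Claim_exact_distinctEle : Prop := ∀ (a : List Int) (n : Int) (k : Int), Dom_distinctEle a n k → Pre_distinctEle a n k → D_distinctEle a n k → distinctEle a n k ≠ distinctEle_alt a n k

-- ===== LEMMAS AND PROOFS =====

-- A list permutation leaves the set of elements unchanged.
lemma pvPerm_toFinset (l1 l2 : List Int) (h : l1.Perm l2) : l1.toFinset = l2.toFinset :=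
  Finset.ext fun x => by simp [List.mem_toFinset, h.mem_iff]

-- The inner while loop ran to completion (result = i) iff no earlier index holds a[i].
lemma pvGo_spec (a : List Int) (i : Int) : ∀ (fuel : Nat) (j : Int), j ≤ i → (i - j).toNat ≤ fuel →
    (pvInnerAGo a i fuel j = i ↔
      ∀ m : Int, j ≤ m → m < i → PySem.List.pyGetD a m 0 ≠ PySem.List.pyGetD a i 0) := by
  intro fuel
  induction fuel with
  | zero =>
    intro j hj hf
    have : j = i := by omega
    subst this
    simp [pvInnerAGo]
    omega
  | succ f ih =>
    intro j hj hf
    simp only [pvInnerAGo]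
    by_cases hlt : j < i
    · simp only [if_pos hlt]
      by_cases heq : PySem.List.pyGetD a i 0 = PySem.List.pyGetD a j 0
      · simp only [if_pos heq]
        constructor
        · intro h; omega
        · intro h; exact absurd heq.symm (h j le_rfl hlt)
      · simp only [if_neg heq]
        rw [ih (j+1) (by omega) (by omega)]
        constructor
        · intro h m hm1 hm2
          rcases eq_or_lt_of_le hm1 with rfl | hlt2
          · exact fun hc => heq hc.symm
          · exact h m (by omega) hm2
        · intro h m hm1 hm2; exact h m (by omega) hm2
    · simp only [if_neg hlt]
      have : j = i := by omega
      subst this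
      simp
      omega

-- index jn survives the inner scan iff a[jn] is not among the earlier window elements
lemma pvFresh_iff (a : List Int) (jn : Nat) (h : jn < a.length) :
    ((jn : Int) = pvInnerA a (jn : Int) 0) ↔ a[jn] ∉ a.take jn := by
  rw [eq_comm, pvInnerA, pvGo_spec a (jn : Int) _ 0 (by omega) (by omega)]
  constructor
  · intro hall hmem
    obtain ⟨m, hm, hget⟩ := List.mem_iff_getElem.mp hmem
    have hmlt : m < jn := by
      have := hm; simp [List.length_take] at this; omega
    have hgv : (a.take jn)[m] = a[m] := List.getElem_take
    apply hall (m : Int) (by omega) (by exact_mod_cast hmlt)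
    rw [PySem.List.pyGetD_natCast, PySem.List.pyGetD_natCast,
        List.getD_eq_getElem _ _ (by omega), List.getD_eq_getElem _ _ (by omega)]
    rw [← hgv, hget]
  · intro hnmem m hm1 hm2
    lift m to ℕ using hm1
    have hmlt : m < jn := by exact_mod_cast hm2
    rw [PySem.List.pyGetD_natCast, PySem.List.pyGetD_natCast,
        List.getD_eq_getElem _ _ (by omega), List.getD_eq_getElem _ _ (by omega)]
    intro hc
    apply hnmem
    rw [← hc]
    apply List.mem_iff_getElem.mpr
    refine ⟨m, by simp [List.length_take]; omega, ?_⟩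
    exact List.getElem_take

-- A's loop over the first kn indices counts the distinct elements of the window.
lemma pvLoopA_card (a : List Int) : ∀ (kn : Nat), kn ≤ a.length →
    (List.range kn).foldl
      (fun (cnt : Int) (j : Nat) => if (j : Int) = pvInnerA a (j : Int) 0 then cnt + 1 else cnt) (0 : Int)
      = (((a.take kn).toFinset.card : Int)) := by
  intro kn
  induction kn with
  | zero => intro _; simp
  | succ m ih =>
    intro h
    rw [List.range_succ, List.foldl_append, ih (by omega), List.foldl_cons, List.foldl_nil]
    rw [List.take_add_one, List.getElem?_eq_getElem (by omega)]
    have htf : (a.take m ++ [a[m]]).toFinset = insert a[m] (a.take m).toFinset := by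
      rw [List.toFinset_append, Finset.insert_eq, Finset.union_comm]; simp
    rw [show (a.take m ++ (some a[m]).toList) = a.take m ++ [a[m]] from rfl, htf]
    by_cases hfresh : a[m] ∈ a.take m
    · rw [if_neg (fun hc => ((pvFresh_iff a m (by omega)).mp hc) hfresh)]
      rw [Finset.insert_eq_self.mpr (List.mem_toFinset.mpr hfresh)]
    · rw [if_pos ((pvFresh_iff a m (by omega)).mpr hfresh)]
      rw [Finset.card_insert_of_notMem (by simp [hfresh])]
      push_cast; ring

-- number of adjacent changes walking down a list, starting from a previous value
def pvChain : Int → List Int → Int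
  | _, [] => 0
  | prev, y :: ys => (if y ≠ prev then 1 else 0) + pvChain y ys

-- on a non-decreasing list, 1 + number of adjacent changes = number of distinct elements
lemma pvChain_card (ys : List Int) : ∀ (y : Int), (y :: ys).Pairwise (· ≤ ·) →
    1 + pvChain y ys = (((y :: ys).toFinset.card : Int)) := by
  induction ys with
  | nil => intro y _; simp [pvChain]
  | cons z zs ih =>
    intro y h
    have h' : (z :: zs).Pairwise (· ≤ ·) := h.tail
    have hy : ∀ w ∈ z :: zs, y ≤ w := fun w hw => (List.pairwise_cons.mp h).1 w hw
    rw [show pvChain y (z :: zs) = (if z ≠ y then 1 else 0) + pvChain z zs from rfl]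
    by_cases hyz : y = z
    · subst hyz
      simp only [ne_eq, not_true_eq_false, ite_false]
      rw [show ((y :: y :: zs).toFinset = (y :: zs).toFinset) by simp]
      rw [← ih y h']
      ring
    · have hne : (y ∉ (z :: zs).toFinset) := by
        simp only [List.mem_toFinset]
        intro hmem
        have h1 : y ≤ z := hy z (by simp)
        rcases List.mem_cons.mp hmem with rfl | hmem'
        · exact hyz rfl
        · have h2 : z ≤ y := ((List.pairwise_cons.mp h').1 y hmem')
          exact hyz (le_antisymm h1 h2)
      rw [show ((y :: z :: zs).toFinset = insert y (z :: zs).toFinset) from by simp]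
      rw [Finset.card_insert_of_notMem hne]
      rw [if_pos (Ne.symm hyz)]
      push_cast
      linarith [ih z h']

-- B's index loop computes the adjacent-change count
lemma pvLoopB_chain (ys : List Int) : ∀ (y c : Int),
    (List.range ys.length).foldl
      (fun cnt j => if (y :: ys).getD (j + 1) 0 ≠ (y :: ys).getD j 0 then cnt + 1 else cnt) c
      = c + pvChain y ys := by
  induction ys with
  | nil => intro y c; simp [pvChain]
  | cons z zs ih =>
    intro y c
    rw [show (z :: zs).length = zs.length + 1 from rfl, List.range_succ_eq_map]
    rw [List.foldl_cons, List.foldl_map]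
    simp only [List.getD_cons_succ, List.getD_cons_zero, Nat.succ_eq_add_one]
    have H := ih z (if ¬z = y then c + 1 else c)
    simp only [List.getD_cons_succ] at H
    rw [H]
    rw [show pvChain y (z :: zs) = (if z ≠ y then 1 else 0) + pvChain z zs from rfl]
    split <;> ring

-- ===== VERDICT (by name: the statement is the Claim_ definition above) =====
theorem distinctEle_spec : Claim_unchanged_distinctEle := by
  intro a n k _ hpre
  unfold Spec_distinctEle
  intro hnd
  unfold distinctEle distinctEle_alt
  by_cases hk0 : k ≤ 0
  · rw [PySem.List.pyRange_one_eq_nil (by omega)]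
    simp [hk0]
  · simp only [if_neg hk0]
    have hkl : k ≤ (a.length : Int) := by
      rcases hpre with h | h
      · exact h
      · rcases a with _ | ⟨x, xs⟩
        · exact absurd ⟨rfl, by omega⟩ hnd
        · simp; omega
    have hknl : k.toNat ≤ a.length := by omega
    -- A side
    rw [PySem.List.pyRange_one 0 k, List.foldl_map]
    simp only [zero_add, Int.sub_zero]
    rw [pvLoopA_card a k.toNat hknl]
    -- B side
    have hslice : PySem.List.slice a none (some k) = a.take k.toNat :=
      PySem.List.slice_to a (by omega)
    rw [hslice]
    have htne : a.take k.toNat ≠ [] := by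
      apply List.ne_nil_of_length_pos
      rw [List.length_take]
      omega
    have hbne : PySem.List.sorted (a.take k.toNat) (fun x => x) false ≠ [] := by
      rw [Ne, PySem.List.sorted_eq_nil_iff]; exact htne
    obtain ⟨y, ys, hb⟩ := List.exists_cons_of_ne_nil hbne
    rw [hb, if_neg (by simp)]
    rw [PySem.List.pyRange_one 1 ((y :: ys).length : Int), List.foldl_map]
    have hlen : (((y :: ys).length : Int) - 1).toNat = ys.length := by
      simp
    rw [hlen]
    have hbody : (fun (cnt : Int) (j : Nat) =>
        if PySem.List.pyGetD (y :: ys) (1 + (j : Int)) 0 ≠ PySem.List.pyGetD (y :: ys) (1 + (j : Int) - 1) 0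
        then cnt + 1 else cnt)
        = (fun (cnt : Int) (j : Nat) =>
            if (y :: ys).getD (j + 1) 0 ≠ (y :: ys).getD j 0 then cnt + 1 else cnt) := by
      funext cnt j
      rw [show (1 + (j : Int)) = ((j + 1 : Nat) : Int) by push_cast; ring,
          show ((j + 1 : Nat) : Int) - 1 = ((j : Nat) : Int) by push_cast; ring,
          PySem.List.pyGetD_natCast, PySem.List.pyGetD_natCast]
    rw [hbody, pvLoopB_chain ys y 1]
    have hpw : (y :: ys).Pairwise (· ≤ ·) := by
      have := PySem.List.sorted_pairwise (xs := a.take k.toNat) (key := fun x => x)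
      rw [hb] at this
      simpa using this
    rw [pvChain_card ys y hpw]
    have hperm : (y :: ys).Perm (a.take k.toNat) := by
      have := PySem.List.sorted_perm (xs := a.take k.toNat) (key := fun x => x) (rev := false)
      rwa [hb] at this
    rw [pvPerm_toFinset _ _ hperm]

theorem distinctEle_changed : Claim_changed_distinctEle := by
  unfold Claim_changed_distinctEle; decide

theorem distinctEle_tight : Claim_exact_distinctEle := by
  intro a n k _ _ hd
  obtain ⟨ha, hk⟩ := hd
  subst ha; subst hk
  show (1 : Int) ≠ (0 : Int)
  decide
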